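-- pv_equiv track=rewrite | github.com/MalevskyOlga/ProgramDashBoard | portal/priority_parser.py | _sheet_sort_key
-- ===== SOURCE A (Python) =====
-- _MONTHS = {'Jan': 1, 'Feb': 2, 'Mar': 3, 'Apr': 4, 'May': 5, 'Jun': 6,
--            'Jul': 7, 'July': 7, 'Aug': 8, 'Sep': 9, 'Oct': 10, 'Nov': 11, 'Dec': 12}
--
-- def _sheet_sort_key(name):
--     """Turn 'Mar26' → (2026, 3) for sorting newest-first."""
--     for mon, num in _MONTHS.items():
--         if name.startswith(mon):
--             try:
--                 yr = int(name[len(mon):])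
--                 return (2000 + yr if yr < 100 else yr, num)
--             except ValueError:
--                 pass
--     return (0, 0)
-- ===== SOURCE B (Python) =====
-- _MONTHS = {'Jan': 1, 'Feb': 2, 'Mar': 3, 'Apr': 4, 'May': 5, 'Jun': 6,
--            'Jul': 7, 'July': 7, 'Aug': 8, 'Sep': 9, 'Oct': 10, 'Nov': 11, 'Dec': 12}
--
-- def _sheet_sort_key(name):
--     """Turn 'Mar26' → (2026, 3): parse the leading alphabetic run once, one dict lookup."""
--     i = 0
--     while i < len(name) and name[i].isalpha():
--         i += 1
--     num = _MONTHS.get(name[:i])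
--     if num is None:
--         return (0, 0)
--     try:
--         yr = int(name[i:])
--     except ValueError:
--         return (0, 0)
--     return (2000 + yr if yr < 100 else yr, num)
-- ===== Notes on version B (the rewrite author's own statement) =====
-- stated objective: idiomatic
-- what changed: Instead of scanning all 13 month keys with startswith and retrying int() after each ValueError, B extracts the leading alphabetic run once, does a single dict .get lookup on it, and parses the remaining suffix once.
import Mathlib
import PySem

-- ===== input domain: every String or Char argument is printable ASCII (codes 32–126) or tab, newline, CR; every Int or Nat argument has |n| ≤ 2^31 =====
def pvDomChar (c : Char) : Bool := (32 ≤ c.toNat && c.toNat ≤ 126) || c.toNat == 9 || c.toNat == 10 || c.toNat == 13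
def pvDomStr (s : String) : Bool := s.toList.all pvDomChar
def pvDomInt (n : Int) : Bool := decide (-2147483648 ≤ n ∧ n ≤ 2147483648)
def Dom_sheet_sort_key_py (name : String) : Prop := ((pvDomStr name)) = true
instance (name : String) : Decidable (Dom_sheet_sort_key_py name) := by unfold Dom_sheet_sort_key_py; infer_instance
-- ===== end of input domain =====

-- B replaces A's 13-key startswith scan (with per-key int() retries) by one leading-alphabetic-run
-- extraction, a single dict lookup and a single int() on the suffix (objective: idiomatic).

-- ===== PORT A =====
-- the module-level _MONTHS dict: association list in insertion order (unique keys)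
def pyMONTHS : List (List Char × Int) :=
  [("Jan".toList, 1), ("Feb".toList, 2), ("Mar".toList, 3), ("Apr".toList, 4),
   ("May".toList, 5), ("Jun".toList, 6), ("Jul".toList, 7), ("July".toList, 7),
   ("Aug".toList, 8), ("Sep".toList, 9), ("Oct".toList, 10), ("Nov".toList, 11),
   ("Dec".toList, 12)]

-- A's for-loop over _MONTHS.items(): on a prefix match try int(name[len(mon):]);
-- ValueError (= none) falls through to the next month; early return on success.
def sheetLoopA : List (List Char × Int) → List Char → Int × Int
  | [], _ => (0, 0)
  | (mon, num) :: rest, cs =>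
    if PySem.Chars.startswith cs mon then
      match PySem.Int.ofChars? (PySem.List.slice cs (some (mon.length : Int)) none) with
      | some yr => (if yr < 100 then 2000 + yr else yr, num)
      | none => sheetLoopA rest cs
    else sheetLoopA rest cs

def sheet_sort_key_py (name : String) : Int × Int :=
  sheetLoopA pyMONTHS name.toList

-- ===== PORT B =====
-- _MONTHS.get(prefix): first-match lookup in the association list (the dict convention)
def monthsGet : List (List Char × Int) → List Char → Option Int
  | [], _ => none
  | (k, v) :: rest, p => if k = p then some v else monthsGet rest p

-- B: the while loop takes the leading alphabetic run (name[:i] / name[i:]),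
-- then one dict lookup and one int() on the suffix.
def sheet_sort_key_py_alt (name : String) : Int × Int :=
  let cs := name.toList
  let p := cs.takeWhile PySem.Chars.isalpha
  let r := cs.dropWhile PySem.Chars.isalpha
  match monthsGet pyMONTHS p with
  | none => (0, 0)
  | some num =>
    match PySem.Int.ofChars? r with
    | none => (0, 0)
    | some yr => (if yr < 100 then 2000 + yr else yr, num)

-- ===== PRECONDITION & SPEC =====
def Spec_sheet_sort_key_py (name : String) (out : Int × Int) : Prop := out = sheet_sort_key_py_alt name
instance (name : String) (out : Int × Int) : Decidable (Spec_sheet_sort_key_py name out) := by unfold Spec_sheet_sort_key_py; infer_instance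

-- ===== CLAIM (what is proved, stated in full; the proofs are below) =====
def Claim_equal_sheet_sort_key_py : Prop := ∀ (name : String), Dom_sheet_sort_key_py name → Spec_sheet_sort_key_py name (sheet_sort_key_py name)

-- ===== LEMMAS AND PROOFS =====

-- an ASCII letter is one of the 52 characters with code 65–90 or 97–122
theorem alpha_bounds (c : Char) (hc : PySem.Chars.isalpha c = true) :
    (65 ≤ c.toNat ∧ c.toNat ≤ 90) ∨ (97 ≤ c.toNat ∧ c.toNat ≤ 122) := by
  rw [PySem.Chars.isalpha, Bool.or_eq_true, PySem.Chars.isupper, PySem.Chars.islower] at hc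
  simp only [Bool.and_eq_true, decide_eq_true_eq] at hc
  rcases hc with ⟨h1, h2⟩ | ⟨h1, h2⟩
  · exact Or.inl ⟨UInt32.le_iff_toNat_le.mp (Char.le_def.mp h1), UInt32.le_iff_toNat_le.mp (Char.le_def.mp h2)⟩
  · exact Or.inr ⟨UInt32.le_iff_toNat_le.mp (Char.le_def.mp h1), UInt32.le_iff_toNat_le.mp (Char.le_def.mp h2)⟩

-- Python's int() raises ValueError on any string whose first character is an ASCII letter
theorem ofChars_alpha_none (c : Char) (w : List Char)
    (hc : PySem.Chars.isalpha c = true) : PySem.Int.ofChars? (c :: w) = none := by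
  have hb := alpha_bounds c hc
  have hsp : PySem.Int.isIntSpace c = false := by
    rw [PySem.Int.isIntSpace]
    simp only [Bool.or_eq_false_iff, decide_eq_false_iff_not]
    refine ⟨⟨⟨⟨⟨?_, ?_⟩, ?_⟩, ?_⟩, ?_⟩, ?_⟩ <;> (rintro rfl; revert hb; decide)
  obtain ⟨u, hu⟩ : ∃ u,
      (List.dropWhile PySem.Int.isIntSpace
        (List.dropWhile PySem.Int.isIntSpace (c :: w)).reverse).reverse = c :: u := by
    rw [List.dropWhile_cons_of_neg (by simp [hsp])]
    rw [show (c :: w).reverse = w.reverse ++ [c] by simp]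
    rw [List.dropWhile_append]
    split
    · exact ⟨[], by simp [List.dropWhile, hsp]⟩
    · exact ⟨(List.dropWhile PySem.Int.isIntSpace w.reverse).reverse, by simp⟩
  simp only [PySem.Int.ofChars?]
  rw [hu]
  obtain ⟨n, rfl, hb'⟩ : ∃ n, c = Char.ofNat n ∧
      ((65 ≤ n ∧ n ≤ 90) ∨ (97 ≤ n ∧ n ≤ 122)) :=
    ⟨c.toNat, (Char.ofNat_toNat c).symm, hb⟩
  rcases hb' with ⟨h1, h2⟩ | ⟨h1, h2⟩ <;> interval_cases n <;> rfl

-- an all-alphabetic prefix of cs is a prefix of cs's leading alphabetic run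
theorem alpha_prefix_takeWhile (m cs : List Char)
    (hm : m.all PySem.Chars.isalpha = true) (hp : m <+: cs) :
    m <+: cs.takeWhile PySem.Chars.isalpha := by
  induction m generalizing cs with
  | nil => exact List.nil_prefix
  | cons a m ih =>
    obtain ⟨t, rfl⟩ := hp
    simp only [List.all_cons, Bool.and_eq_true] at hm
    rw [List.cons_append, List.takeWhile_cons_of_pos hm.1]
    exact List.cons_prefix_cons.mpr ⟨rfl, ih (m ++ t) hm.2 (List.prefix_append m t)⟩

-- the loop invariant: A's month scan equals B's parse-once-then-lookup shape,
-- for any month table whose keys are alphabetic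
theorem loop_eq (M : List (List Char × Int))
    (hM : ∀ mn ∈ M, (mn.1).all PySem.Chars.isalpha = true) (cs : List Char) :
    sheetLoopA M cs =
      match monthsGet M (cs.takeWhile PySem.Chars.isalpha) with
      | none => (0, 0)
      | some num =>
        match PySem.Int.ofChars? (cs.dropWhile PySem.Chars.isalpha) with
        | none => (0, 0)
        | some yr => (if yr < 100 then 2000 + yr else yr, num) := by
  induction M with
  | nil => rfl
  | cons hd rest ih =>
    obtain ⟨mon, num⟩ := hd
    have hmon : mon.all PySem.Chars.isalpha = true := hM _ List.mem_cons_self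
    have hrest : ∀ mn ∈ rest, (mn.1).all PySem.Chars.isalpha = true :=
      fun mn hmn => hM mn (List.mem_cons_of_mem _ hmn)
    have hcat : cs.takeWhile PySem.Chars.isalpha ++ cs.dropWhile PySem.Chars.isalpha = cs :=
      List.takeWhile_append_dropWhile
    simp only [sheetLoopA, monthsGet]
    by_cases hs : PySem.Chars.startswith cs mon
    · have hpre : mon <+: cs := (PySem.Chars.startswith_iff cs mon).mp hs
      have hmonp : mon <+: cs.takeWhile PySem.Chars.isalpha :=
        alpha_prefix_takeWhile mon cs hmon hpre
      rw [if_pos hs, PySem.List.slice_from_natCast]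
      by_cases hmp : mon = cs.takeWhile PySem.Chars.isalpha
      · have hdrop : cs.drop mon.length = cs.dropWhile PySem.Chars.isalpha := by
          conv_lhs => rw [← hcat, hmp]
          exact List.drop_left
        rw [if_pos hmp, hdrop]
        cases hoc : PySem.Int.ofChars? (cs.dropWhile PySem.Chars.isalpha) with
        | some yr => rfl
        | none =>
          rw [ih hrest]
          cases monthsGet rest (cs.takeWhile PySem.Chars.isalpha) <;> simp [hoc]
      · have hlt : mon.length < (cs.takeWhile PySem.Chars.isalpha).length :=
          lt_of_le_of_ne hmonp.length_le (fun h => hmp (hmonp.eq_of_length h))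
        have hd : cs.drop mon.length =
            (cs.takeWhile PySem.Chars.isalpha).drop mon.length ++ cs.dropWhile PySem.Chars.isalpha := by
          conv_lhs => rw [← hcat]
          rw [List.drop_append_of_le_length (le_of_lt hlt)]
        obtain ⟨a, d', had⟩ : ∃ a d',
            (cs.takeWhile PySem.Chars.isalpha).drop mon.length = a :: d' := by
          cases h : (cs.takeWhile PySem.Chars.isalpha).drop mon.length with
          | nil => exact absurd (List.drop_eq_nil_iff.mp h) (by omega)
          | cons a d' => exact ⟨a, d', rfl⟩
        have ha : PySem.Chars.isalpha a = true := by
          have : a ∈ cs.takeWhile PySem.Chars.isalpha :=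
            List.mem_of_mem_drop (had ▸ List.mem_cons_self)
          exact List.mem_takeWhile_imp this
        have hoc : PySem.Int.ofChars? (cs.drop mon.length) = none := by
          rw [hd, had, List.cons_append]
          exact ofChars_alpha_none a _ ha
        rw [hoc, if_neg hmp, ih hrest]
    · have hne : mon ≠ cs.takeWhile PySem.Chars.isalpha := by
        intro h
        exact hs ((PySem.Chars.startswith_iff cs mon).mpr (h ▸ List.takeWhile_prefix _))
      rw [if_neg hs, if_neg hne, ih hrest]

-- ===== VERDICT (by name: the statement is the Claim_ definition above) =====
theorem sheet_sort_key_py_spec : Claim_equal_sheet_sort_key_py := by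
  intro name _
  unfold Spec_sheet_sort_key_py sheet_sort_key_py sheet_sort_key_py_alt
  rw [loop_eq pyMONTHS (by decide) name.toList]
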